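-- pv_equiv track=rewrite | github.com/Adelin4702/Licenta | TrafficMonitoringSystem/UI/visualization/yearly_viz.py | _prepare_yearly_data
-- ===== SOURCE A (Python) =====
-- def _prepare_yearly_data(data, year):
--     """Prepare yearly data for visualization"""
--     # Create map of existing data
--     data_map = {int(row[0]): (row[1], row[2]) for row in data}
--
--     vehicule_mari = []
--     vehicule_mici = []
--     months = []
--
--     # Romanian month names
--     month_names = [
--         '', 'Ian', 'Feb', 'Mar', 'Apr', 'Mai', 'Iun',
--         'Iul', 'Aug', 'Sep', 'Oct', 'Nov', 'Dec'
--     ]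
--
--     # Fill data for all 12 months
--     for month_num in range(1, 13):
--         if month_num in data_map:
--             mari, mici = data_map[month_num]
--             vehicule_mari.append(mari or 0)
--             vehicule_mici.append(mici or 0)
--         else:
--             vehicule_mari.append(0)
--             vehicule_mici.append(0)
--
--         months.append(month_names[month_num])
--
--     return months, vehicule_mari, vehicule_mici
-- ===== SOURCE B (Python) =====
-- def _prepare_yearly_data(data, year):
--     """Prepare yearly data for visualization"""
--     month_names = [
--         '', 'Ian', 'Feb', 'Mar', 'Apr', 'Mai', 'Iun',
--         'Iul', 'Aug', 'Sep', 'Oct', 'Nov', 'Dec'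
--     ]
--     vehicule_mari = [0] * 12
--     vehicule_mici = [0] * 12
--     for row in data:
--         m = int(row[0])
--         if 1 <= m <= 12:
--             vehicule_mari[m - 1] = row[1] or 0
--             vehicule_mici[m - 1] = row[2] or 0
--     return month_names[1:13], vehicule_mari, vehicule_mici
-- ===== Notes on version B (the rewrite author's own statement) =====
-- stated objective: simpler
-- what changed: Replaces the intermediate dict plus a 12-iteration gather loop with preallocated [0]*12 arrays filled by a single scatter pass over the sparse rows (last write wins), with the month-name list produced by slicing instead of appending in the loop.
import Mathlib
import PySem

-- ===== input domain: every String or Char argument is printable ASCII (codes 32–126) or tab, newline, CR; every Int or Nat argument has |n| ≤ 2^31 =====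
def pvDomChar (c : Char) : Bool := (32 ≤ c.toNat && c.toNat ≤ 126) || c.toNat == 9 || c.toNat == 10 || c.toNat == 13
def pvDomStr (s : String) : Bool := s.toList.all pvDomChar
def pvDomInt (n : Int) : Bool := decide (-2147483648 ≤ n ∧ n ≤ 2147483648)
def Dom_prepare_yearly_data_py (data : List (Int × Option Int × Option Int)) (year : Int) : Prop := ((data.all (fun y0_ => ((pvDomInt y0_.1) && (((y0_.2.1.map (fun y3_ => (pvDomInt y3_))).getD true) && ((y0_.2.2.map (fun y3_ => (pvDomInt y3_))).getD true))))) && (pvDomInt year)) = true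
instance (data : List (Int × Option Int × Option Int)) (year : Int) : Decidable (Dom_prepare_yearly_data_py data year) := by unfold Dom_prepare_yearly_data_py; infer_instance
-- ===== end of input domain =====

-- B: replaces the dict + 12-month gather loop with preallocated [0]*12 arrays filled by one
-- scatter pass over the rows (last write wins) and a month-name slice; simpler, same cost.


-- Python's `x or 0` on an Optional[int]: falsy (None or 0) gives 0, else the value itself.
def pvOrZero (o : Option Int) : Int :=
  match o with
  | none => 0
  | some v => if v = 0 then 0 else v

-- Romanian month names (shared literal of both Pythons)
def pvMonthNames : List String :=
  ["", "Ian", "Feb", "Mar", "Apr", "Mai", "Iun", "Iul", "Aug", "Sep", "Oct", "Nov", "Dec"]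

-- ===== PORT A =====
def prepare_yearly_data_py (data : List (Int × Option Int × Option Int)) (year : Int) : List String × List Int × List Int :=
  let data_map : PySem.Dict Int (Option Int × Option Int) :=
    data.foldl (fun d row => d.insert row.1 (row.2.1, row.2.2)) PySem.Dict.empty
  let st :=
    (PySem.List.pyRange 1 13 1).foldl
      (fun (st : List Int × List Int × List String) month_num =>
        let (vehicule_mari, vehicule_mici, months) := st
        match data_map.get? month_num with
        | some (mari, mici) =>
            (vehicule_mari ++ [pvOrZero mari], vehicule_mici ++ [pvOrZero mici],
             months ++ [PySem.List.pyGetD pvMonthNames month_num ""])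
        | none =>
            (vehicule_mari ++ [0], vehicule_mici ++ [0],
             months ++ [PySem.List.pyGetD pvMonthNames month_num ""]))
      ([], [], [])
  (st.2.2, st.1, st.2.1)

-- ===== PORT B =====
def prepare_yearly_data_py_alt (data : List (Int × Option Int × Option Int)) (year : Int) : List String × List Int × List Int :=
  let arrays :=
    data.foldl
      (fun (st : List Int × List Int) row =>
        let m := row.1
        if 1 ≤ m ∧ m ≤ 12 then
          (PySem.List.pySetD st.1 (m - 1) (pvOrZero row.2.1),
           PySem.List.pySetD st.2 (m - 1) (pvOrZero row.2.2))
        else st)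
      (List.replicate 12 (0 : Int), List.replicate 12 (0 : Int))
  (PySem.List.slice pvMonthNames (some 1) (some 13), arrays.1, arrays.2)

-- ===== PRECONDITION & SPEC =====
def Spec_prepare_yearly_data_py (data : List (Int × Option Int × Option Int)) (year : Int) (out : List String × List Int × List Int) : Prop := out = prepare_yearly_data_py_alt data year
instance (data : List (Int × Option Int × Option Int)) (year : Int) (out : List String × List Int × List Int) : Decidable (Spec_prepare_yearly_data_py data year out) := by unfold Spec_prepare_yearly_data_py; infer_instance

-- ===== CLAIM (what is proved, stated in full; the proofs are below) =====
def Claim_equal_prepare_yearly_data_py : Prop := ∀ (data : List (Int × Option Int × Option Int)) (year : Int), Dom_prepare_yearly_data_py data year → Spec_prepare_yearly_data_py data year (prepare_yearly_data_py data year)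

-- ===== LEMMAS AND PROOFS =====

-- last row with key m, as a fold (common characterisation of both programs)
def pvLast (l : List (Int × Option Int × Option Int)) (m : Int) (o : Option (Option Int × Option Int)) : Option (Option Int × Option Int) :=
  l.foldl (fun acc row => if row.1 = m then some (row.2.1, row.2.2) else acc) o

theorem pvDict_get (l : List (Int × Option Int × Option Int)) (d : PySem.Dict Int (Option Int × Option Int)) (m : Int) :
    (l.foldl (fun d row => d.insert row.1 (row.2.1, row.2.2)) d).get? m = pvLast l m (d.get? m) := by
  induction l generalizing d with
  | nil => rfl
  | cons r t ih =>
    simp only [List.foldl_cons, pvLast, ih, PySem.Dict.get?_insert]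
    congr 1
    by_cases h : m = r.1 <;> simp [h, eq_comm]

theorem pvLast_init (t : List (Int × Option Int × Option Int)) (m : Int) (o : Option (Option Int × Option Int)) :
    pvLast t m o = match pvLast t m none with | some p => some p | none => o := by
  induction t generalizing o with
  | nil => rfl
  | cons r t ih =>
    have hc : ∀ o', pvLast (r :: t) m o' = pvLast t m (if r.1 = m then some (r.2.1, r.2.2) else o') :=
      fun _ => rfl
    rw [hc o, hc none]
    by_cases hr : r.1 = m
    · rw [if_pos hr, if_pos hr, ih (some (r.2.1, r.2.2))]
      cases hX : pvLast t m none <;> simp only [hX]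
    · rw [if_neg hr, if_neg hr, ih o]

-- one step of B's scatter loop
def pvStep (st : List Int × List Int) (row : Int × Option Int × Option Int) : List Int × List Int :=
  let m := row.1
  if 1 ≤ m ∧ m ≤ 12 then
    (PySem.List.pySetD st.1 (m - 1) (pvOrZero row.2.1),
     PySem.List.pySetD st.2 (m - 1) (pvOrZero row.2.2))
  else st

def pvScatter (l : List (Int × Option Int × Option Int)) (st : List Int × List Int) : List Int × List Int :=
  l.foldl pvStep st

theorem pvStep_in (st : List Int × List Int) (row : Int × Option Int × Option Int)
    (h : 1 ≤ row.1 ∧ row.1 ≤ 12) :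
    pvStep st row = (st.1.set (row.1 - 1).toNat (pvOrZero row.2.1),
                     st.2.set (row.1 - 1).toNat (pvOrZero row.2.2)) := by
  have hnn : (0 : Int) ≤ row.1 - 1 := by omega
  simp only [pvStep]
  rw [if_pos h, PySem.List.pySetD_of_nonneg _ _ hnn, PySem.List.pySetD_of_nonneg _ _ hnn]

theorem pvScatter_len (l : List (Int × Option Int × Option Int)) (st : List Int × List Int) :
    (pvScatter l st).1.length = st.1.length ∧ (pvScatter l st).2.length = st.2.length := by
  induction l generalizing st with
  | nil => exact ⟨rfl, rfl⟩
  | cons r t ih =>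
    show (pvScatter t (pvStep st r)).1.length = st.1.length ∧
        (pvScatter t (pvStep st r)).2.length = st.2.length
    by_cases hr : 1 ≤ r.1 ∧ r.1 ≤ 12
    · rw [pvStep_in st r hr]
      refine ⟨?_, ?_⟩
      · rw [(ih _).1]; simp
      · rw [(ih _).2]; simp
    · rw [show pvStep st r = st from by simp only [pvStep]; rw [if_neg hr]]
      exact ih st

-- slot k of the scatter = the last-match fold view
theorem pvScatter_get (l : List (Int × Option Int × Option Int)) (st : List Int × List Int)
    (h1 : st.1.length = 12) (h2 : st.2.length = 12) (k : Nat) (hk : k < 12) :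
    (pvScatter l st).1[k]?.getD 0 = (match pvLast l ((k : Int) + 1) none with
        | some p => pvOrZero p.1 | none => st.1[k]?.getD 0)
    ∧ (pvScatter l st).2[k]?.getD 0 = (match pvLast l ((k : Int) + 1) none with
        | some p => pvOrZero p.2 | none => st.2[k]?.getD 0) := by
  induction l generalizing st with
  | nil => exact ⟨rfl, rfl⟩
  | cons r t ih =>
    have hcons : pvScatter (r :: t) st = pvScatter t (pvStep st r) := rfl
    by_cases hr : 1 ≤ r.1 ∧ r.1 ≤ 12
    · have hset := pvStep_in st r hr
      have ih' := ih (pvStep st r) (by rw [hset]; simpa using h1) (by rw [hset]; simpa using h2)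
      have hL : pvLast (r :: t) ((k : Int) + 1) none
          = pvLast t ((k : Int) + 1) (if r.1 = (k : Int) + 1 then some (r.2.1, r.2.2) else none) := rfl
      by_cases he : r.1 = (k : Int) + 1
      · have hidx : (r.1 - 1).toNat = k := by omega
        have hslot1 : (pvStep st r).1[k]?.getD 0 = pvOrZero r.2.1 := by
          rw [hset]; simp [hidx, List.getElem?_set_self (by omega : k < st.1.length)]
        have hslot2 : (pvStep st r).2[k]?.getD 0 = pvOrZero r.2.2 := by
          rw [hset]; simp [hidx, List.getElem?_set_self (by omega : k < st.2.length)]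
        rw [hcons, hL, if_pos he, pvLast_init t ((k : Int) + 1) (some (r.2.1, r.2.2))]
        rcases ih' with ⟨ha, hb⟩
        rw [ha, hb, hslot1, hslot2]
        cases pvLast t ((k : Int) + 1) none <;> exact ⟨rfl, rfl⟩
      · have hidx : (r.1 - 1).toNat ≠ k := by omega
        have hslot1 : (pvStep st r).1[k]? = st.1[k]? := by
          rw [hset]; exact List.getElem?_set_ne hidx
        have hslot2 : (pvStep st r).2[k]? = st.2[k]? := by
          rw [hset]; exact List.getElem?_set_ne hidx
        rw [hcons, hL, if_neg he]
        rcases ih' with ⟨ha, hb⟩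
        rw [ha, hb, hslot1, hslot2]
        exact ⟨rfl, rfl⟩
    · have hstep : pvStep st r = st := by simp only [pvStep]; rw [if_neg hr]
      have he : r.1 ≠ (k : Int) + 1 := by omega
      have hL : pvLast (r :: t) ((k : Int) + 1) none = pvLast t ((k : Int) + 1) none := by
        simp only [pvLast, List.foldl_cons]; rw [if_neg he]
      rw [hcons, hstep, hL]
      exact ih st h1 h2

-- value appended for a month, as a function of the dict lookup
def pvValA (o : Option (Option Int × Option Int)) : Int :=
  match o with | none => 0 | some p => pvOrZero p.1
def pvValB (o : Option (Option Int × Option Int)) : Int :=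
  match o with | none => 0 | some p => pvOrZero p.2

theorem pvFoldl_triple (l : List Int) (f g : Int → Int) (h : Int → String)
    (a b : List Int) (c : List String) :
    l.foldl (fun (st : List Int × List Int × List String) x =>
        (st.1 ++ [f x], st.2.1 ++ [g x], st.2.2 ++ [h x])) (a, b, c)
      = (a ++ l.map f, b ++ l.map g, c ++ l.map h) := by
  induction l generalizing a b c with
  | nil => simp
  | cons x t ih => simp [ih]

theorem prepare_yearly_data_py_spec : Claim_equal_prepare_yearly_data_py := by
  intro data year _
  unfold Spec_prepare_yearly_data_py
  show prepare_yearly_data_py data year = prepare_yearly_data_py_alt data year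
  unfold prepare_yearly_data_py
  have hB : prepare_yearly_data_py_alt data year
      = (PySem.List.slice pvMonthNames (some 1) (some 13),
         (pvScatter data (List.replicate 12 0, List.replicate 12 0)).1,
         (pvScatter data (List.replicate 12 0, List.replicate 12 0)).2) := rfl
  rw [hB]
  set dm := data.foldl (fun d row => d.insert row.1 (row.2.1, row.2.2)) PySem.Dict.empty with hdm
  have hstep : (fun (st : List Int × List Int × List String) month_num =>
      match dm.get? month_num with
      | some (mari, mici) =>
          (st.1 ++ [pvOrZero mari], st.2.1 ++ [pvOrZero mici],
           st.2.2 ++ [PySem.List.pyGetD pvMonthNames month_num ""])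
      | none =>
          (st.1 ++ [0], st.2.1 ++ [0],
           st.2.2 ++ [PySem.List.pyGetD pvMonthNames month_num ""]))
      = (fun (st : List Int × List Int × List String) month_num =>
          (st.1 ++ [pvValA (dm.get? month_num)], st.2.1 ++ [pvValB (dm.get? month_num)],
           st.2.2 ++ [PySem.List.pyGetD pvMonthNames month_num ""])) := by
    funext st mn
    cases h : dm.get? mn with
    | none => simp [pvValA, pvValB, h]
    | some p => cases p; simp [pvValA, pvValB, h]
  simp only [hstep, pvFoldl_triple, List.nil_append]
  have hget : ∀ m : Int, dm.get? m = pvLast data m none := by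
    intro m; rw [hdm, pvDict_get]; rfl
  have hrange : PySem.List.pyRange 1 13 1 = [1,2,3,4,5,6,7,8,9,10,11,12] := by decide
  have hmain : ∀ k : Nat, k < 12 →
      (pvValA (dm.get? ((k : Int) + 1))
          = (pvScatter data (List.replicate 12 0, List.replicate 12 0)).1[k]?.getD 0
        ∧ pvValB (dm.get? ((k : Int) + 1))
          = (pvScatter data (List.replicate 12 0, List.replicate 12 0)).2[k]?.getD 0) := by
    intro k hk
    have hs := pvScatter_get data (List.replicate 12 0, List.replicate 12 0) (by simp) (by simp) k hk
    rcases hs with ⟨ha, hb⟩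
    rw [ha, hb, hget]
    refine ⟨?_, ?_⟩ <;> cases hX : pvLast data ((k : Int) + 1) none <;>
      (simp [pvValA, pvValB, hX] <;> (interval_cases k <;> rfl))
  have hlen1 : (pvScatter data (List.replicate 12 0, List.replicate 12 0)).1.length = 12 := by
    have := (pvScatter_len data (List.replicate 12 0, List.replicate 12 0)).1; simpa using this
  have hlen2 : (pvScatter data (List.replicate 12 0, List.replicate 12 0)).2.length = 12 := by
    have := (pvScatter_len data (List.replicate 12 0, List.replicate 12 0)).2; simpa using this
  refine Prod.ext ?_ (Prod.ext ?_ ?_)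
  · show (PySem.List.pyRange 1 13 1).map (fun mn => PySem.List.pyGetD pvMonthNames mn "")
        = PySem.List.slice pvMonthNames (some 1) (some 13)
    decide
  · show (PySem.List.pyRange 1 13 1).map (fun mn => pvValA (dm.get? mn))
        = (pvScatter data (List.replicate 12 0, List.replicate 12 0)).1
    apply List.ext_getElem?
    intro k
    by_cases hk : k < 12
    · have hkm : k < ((PySem.List.pyRange 1 13 1).map (fun mn => pvValA (dm.get? mn))).length := by
        rw [List.length_map, hrange]; simpa using hk
      rw [List.getElem?_eq_getElem hkm, List.getElem?_eq_getElem (by omega : k < (pvScatter data (List.replicate 12 0, List.replicate 12 0)).1.length)]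
      have hmem : (PySem.List.pyRange 1 13 1)[k]'(by rw [hrange]; simpa using hk) = (k : Int) + 1 := by
        rw [PySem.List.getElem_pyRange_one]; omega
      have := (hmain k hk).1
      rw [List.getElem?_eq_getElem (by omega : k < (pvScatter data (List.replicate 12 0, List.replicate 12 0)).1.length)] at this
      simp only [List.getElem_map, hmem, this, Option.getD_some]
    · rw [List.getElem?_eq_none, List.getElem?_eq_none]
      · omega
      · rw [List.length_map, hrange]; simpa using Nat.le_of_not_lt hk
  · show (PySem.List.pyRange 1 13 1).map (fun mn => pvValB (dm.get? mn))
        = (pvScatter data (List.replicate 12 0, List.replicate 12 0)).2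
    apply List.ext_getElem?
    intro k
    by_cases hk : k < 12
    · have hkm : k < ((PySem.List.pyRange 1 13 1).map (fun mn => pvValB (dm.get? mn))).length := by
        rw [List.length_map, hrange]; simpa using hk
      rw [List.getElem?_eq_getElem hkm, List.getElem?_eq_getElem (by omega : k < (pvScatter data (List.replicate 12 0, List.replicate 12 0)).2.length)]
      have hmem : (PySem.List.pyRange 1 13 1)[k]'(by rw [hrange]; simpa using hk) = (k : Int) + 1 := by
        rw [PySem.List.getElem_pyRange_one]; omega
      have := (hmain k hk).2
      rw [List.getElem?_eq_getElem (by omega : k < (pvScatter data (List.replicate 12 0, List.replicate 12 0)).2.length)] at this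
      simp only [List.getElem_map, hmem, this, Option.getD_some]
    · rw [List.getElem?_eq_none, List.getElem?_eq_none]
      · omega
      · rw [List.length_map, hrange]; simpa using Nat.le_of_not_lt hk
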